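-- pv_equiv track=rewrite | github.com/devpranoy/pookalam | test.py | filtercolors
-- ===== SOURCE A (Python) =====
-- def filtercolors(color):
-- 	item = []
-- 	for a in color:
-- 		item.append(a)
-- 	for i in range(len(item)):
-- 		if item[i] == "silver":
-- 			color.remove(item[i])
-- 			color.append("white")
-- 		if item[i] == "gray":
-- 			color.remove(item[i])
-- 		if item[i] == "maroon":
-- 			color.remove(item[i])
-- 			color.append("red")
-- 		if item[i] == "olive":
-- 			color.remove(item[i])
-- 			color.append("yellow")
-- 		if item[i] == "lime":
-- 			color.remove(item[i])
-- 			color.append("green")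
-- 		if item[i] == "aqua" or item[i] == "teal" or item[i] == "navy":
-- 			color.remove(item[i])
-- 			color.append("blue")
-- 		if item[i] == "fuchsia":
-- 			color.remove(item[i])
-- 			color.append("purple")
-- 		if item[i] == "black":
-- 			color.remove(item[i])
-- 	return color
-- ===== SOURCE B (Python) =====
-- # One filtering pass for kept colors plus one pass collecting replacements, concatenated.
-- # Like A, mutates the argument list in place (via color[:] = ...) and returns it.
-- _REPL = {"silver": "white", "maroon": "red", "olive": "yellow", "lime": "green",
--          "aqua": "blue", "teal": "blue", "navy": "blue", "fuchsia": "purple"}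
-- _DROP = {"gray", "black"}
--
-- def filtercolors(color):
--     kept = [c for c in color if c not in _REPL and c not in _DROP]
--     tail = [_REPL[c] for c in color if c in _REPL]
--     color[:] = kept + tail
--     return color
-- ===== Notes on version B (the rewrite author's own statement) =====
-- stated objective: simpler
-- what changed: Replaces the copy-then-repeated-list.remove loop by one pass that filters the kept colors and one pass that collects replacements, concatenated; same in-place mutation and return value.
import Mathlib
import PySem

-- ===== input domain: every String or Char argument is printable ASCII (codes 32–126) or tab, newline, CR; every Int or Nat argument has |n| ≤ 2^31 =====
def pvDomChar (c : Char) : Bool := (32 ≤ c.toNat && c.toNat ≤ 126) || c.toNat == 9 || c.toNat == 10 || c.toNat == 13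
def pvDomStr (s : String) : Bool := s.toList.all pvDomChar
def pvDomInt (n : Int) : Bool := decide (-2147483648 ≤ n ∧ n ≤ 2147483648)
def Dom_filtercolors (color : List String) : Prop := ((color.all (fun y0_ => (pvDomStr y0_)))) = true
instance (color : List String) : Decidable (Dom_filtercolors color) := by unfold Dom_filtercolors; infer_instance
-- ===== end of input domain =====

-- B replaces A's copy-then-repeated-list.remove loop by one filtering pass plus
-- one replacement-collecting pass, concatenated (objective: simpler). Both the Python A and
-- the Python B mutate the argument list in place and return it; in both the returned list
-- and the final content of the argument are the same value, and the equivalence proved here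
-- is about the return value.

-- ===== PORT A =====
-- one body of A's loop: the eight sequential 'if' statements, in A's order.
-- 'color.remove(x)' is PySem.List.remove?; it is applied only right after x was tested equal
-- to the current element a of the snapshot, where it always succeeds (each occurrence of a
-- special name in the snapshot removes one matching occurrence still present in color, and
-- the appended replacement names are never special), so '.getD c' is exact here — A's
-- Python never raises ValueError.
def pvStepA (c : List String) (a : String) : List String :=
  let c := if a = "silver" then (PySem.List.remove? c a).getD c ++ ["white"] else c
  let c := if a = "gray" then (PySem.List.remove? c a).getD c else c
  let c := if a = "maroon" then (PySem.List.remove? c a).getD c ++ ["red"] else c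
  let c := if a = "olive" then (PySem.List.remove? c a).getD c ++ ["yellow"] else c
  let c := if a = "lime" then (PySem.List.remove? c a).getD c ++ ["green"] else c
  let c := if a = "aqua" ∨ a = "teal" ∨ a = "navy" then (PySem.List.remove? c a).getD c ++ ["blue"] else c
  let c := if a = "fuchsia" then (PySem.List.remove? c a).getD c ++ ["purple"] else c
  let c := if a = "black" then (PySem.List.remove? c a).getD c else c
  c

def filtercolors (color : List String) : List String :=
  -- item = []; for a in color: item.append(a)
  let item := color.foldl (fun acc a => acc ++ [a]) []
  -- for i in range(len(item)): ... item[i] ...  — the loop reads item's elements in order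
  item.foldl pvStepA color

-- ===== PORT B =====
def pvRepl : PySem.Dict String String :=
  PySem.Dict.ofList [("silver", "white"), ("maroon", "red"), ("olive", "yellow"),
    ("lime", "green"), ("aqua", "blue"), ("teal", "blue"), ("navy", "blue"), ("fuchsia", "purple")]

def pvDrop : PySem.Set String := PySem.Set.ofList ["gray", "black"]

def filtercolors_alt (color : List String) : List String :=
  let kept := color.filter (fun c => !(pvRepl.contains c) && !(decide (c ∈ pvDrop)))
  let tail := color.filterMap (fun c => pvRepl.get? c)
  kept ++ tail

-- ===== PRECONDITION & SPEC =====
def Spec_filtercolors (color : List String) (out : List String) : Prop := out = filtercolors_alt color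
instance (color : List String) (out : List String) : Decidable (Spec_filtercolors color out) := by unfold Spec_filtercolors; infer_instance

-- ===== CLAIM (what is proved, stated in full; the proofs are below) =====
def Claim_equal_filtercolors : Prop := ∀ (color : List String), Dom_filtercolors color → Spec_filtercolors color (filtercolors color)

-- ===== LEMMAS AND PROOFS =====

-- the "kept" predicate and the replacement lookup, exactly as B computes them
def pvKeep (a : String) : Bool := !(pvRepl.contains a) && !(decide (a ∈ pvDrop))
def pvRepl? (a : String) : Option String := pvRepl.get? a

lemma pvRepl_mk : pvRepl = PySem.Dict.mk [("silver", "white"), ("maroon", "red"),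
    ("olive", "yellow"), ("lime", "green"), ("aqua", "blue"), ("teal", "blue"),
    ("navy", "blue"), ("fuchsia", "purple")] := by decide

lemma pvRepl?_eq (a : String) : pvRepl? a =
    if "silver" = a then some "white" else if "maroon" = a then some "red"
    else if "olive" = a then some "yellow" else if "lime" = a then some "green"
    else if "aqua" = a then some "blue" else if "teal" = a then some "blue"
    else if "navy" = a then some "blue" else if "fuchsia" = a then some "purple" else none := by
  rw [pvRepl?, pvRepl_mk]
  by_cases h1 : "silver" = a <;> by_cases h2 : "maroon" = a <;> by_cases h3 : "olive" = a <;>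
    by_cases h4 : "lime" = a <;> by_cases h5 : "aqua" = a <;> by_cases h6 : "teal" = a <;>
    by_cases h7 : "navy" = a <;> by_cases h8 : "fuchsia" = a <;>
    simp_all [beq_iff_eq, PySem.Dict.get?]

lemma pvRepl?_eq_none_of_keep {a : String} (h : pvKeep a = true) : pvRepl? a = none := by
  simp only [pvKeep, Bool.and_eq_true, Bool.not_eq_true'] at h
  have hc := h.1
  rw [PySem.Dict.contains_eq_isSome_get?] at hc
  simpa [pvRepl?, Option.isSome_eq_false_iff, Option.isNone_iff_eq_none] using hc

lemma pvKeep_true_of {a : String} (hr : pvRepl? a = none) (hg : a ≠ "gray") (hb : a ≠ "black") :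
    pvKeep a = true := by
  simp only [pvKeep, Bool.and_eq_true, Bool.not_eq_true']
  constructor
  · rw [PySem.Dict.contains_eq_isSome_get?]
    simpa [pvRepl?] using hr
  · simp [pvDrop, PySem.Set.ofList, hg, hb]

-- A's eight ifs, summarised by what B's classification says about a
lemma pvStepA_eq (c : List String) (a : String) :
    pvStepA c a =
      if pvKeep a then c
      else match pvRepl? a with
        | some r => (PySem.List.remove? c a).getD c ++ [r]
        | none => (PySem.List.remove? c a).getD c := by
  by_cases h1 : a = "silver"
  · subst h1; simp [pvStepA, show pvKeep "silver" = false from by decide,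
      show pvRepl? "silver" = some "white" from by decide]
  by_cases h2 : a = "gray"
  · subst h2; simp [pvStepA, show pvKeep "gray" = false from by decide,
      show pvRepl? "gray" = none from by decide]
  by_cases h3 : a = "maroon"
  · subst h3; simp [pvStepA, show pvKeep "maroon" = false from by decide,
      show pvRepl? "maroon" = some "red" from by decide]
  by_cases h4 : a = "olive"
  · subst h4; simp [pvStepA, show pvKeep "olive" = false from by decide,
      show pvRepl? "olive" = some "yellow" from by decide]
  by_cases h5 : a = "lime"
  · subst h5; simp [pvStepA, show pvKeep "lime" = false from by decide,
      show pvRepl? "lime" = some "green" from by decide]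
  by_cases h6 : a = "aqua"
  · subst h6; simp [pvStepA, show pvKeep "aqua" = false from by decide,
      show pvRepl? "aqua" = some "blue" from by decide]
  by_cases h7 : a = "teal"
  · subst h7; simp [pvStepA, show pvKeep "teal" = false from by decide,
      show pvRepl? "teal" = some "blue" from by decide]
  by_cases h8 : a = "navy"
  · subst h8; simp [pvStepA, show pvKeep "navy" = false from by decide,
      show pvRepl? "navy" = some "blue" from by decide]
  by_cases h9 : a = "fuchsia"
  · subst h9; simp [pvStepA, show pvKeep "fuchsia" = false from by decide,
      show pvRepl? "fuchsia" = some "purple" from by decide]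
  by_cases h10 : a = "black"
  · subst h10; simp [pvStepA, show pvKeep "black" = false from by decide,
      show pvRepl? "black" = none from by decide]
  have hr : pvRepl? a = none := by
    rw [pvRepl?_eq]
    simp [Ne.symm h1, Ne.symm h3, Ne.symm h4, Ne.symm h5, Ne.symm h6, Ne.symm h7,
      Ne.symm h8, Ne.symm h9]
  have hk : pvKeep a = true := pvKeep_true_of hr h2 h10
  simp [pvStepA, h1, h2, h3, h4, h5, h6, h7, h8, h9, h10, hk]

-- remove? removes the FIRST occurrence: a prefix not containing a is skipped
lemma remove?_append_not_mem {a : String} {kp s : List String} (h : a ∉ kp) :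
    PySem.List.remove? (kp ++ a :: s) a = some (kp ++ s) := by
  induction kp with
  | nil => simp
  | cons x xs ih =>
    have hx : x ≠ a := by intro e; exact h (by simp [e])
    have hm : a ∉ xs := fun m => h (List.mem_cons_of_mem _ m)
    simp only [List.cons_append, PySem.List.remove?_cons_of_ne _ hx, ih hm, Option.map_some]

lemma not_mem_filter_keep {a : String} (h : pvKeep a = false) (l : List String) :
    a ∉ l.filter pvKeep := by
  intro m
  have := List.of_mem_filter m
  simp [h] at this

-- loop invariant: after A has processed the prefix p of the snapshot (remainder s),
-- color = (kept part of p) ++ s ++ (replacements of p)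
lemma loopA_inv (s p : List String) :
    s.foldl pvStepA (p.filter pvKeep ++ s ++ p.filterMap pvRepl?) =
      (p ++ s).filter pvKeep ++ (p ++ s).filterMap pvRepl? := by
  induction s generalizing p with
  | nil => simp
  | cons a s' ih =>
    have step : pvStepA (p.filter pvKeep ++ a :: s' ++ p.filterMap pvRepl?) a =
        (p ++ [a]).filter pvKeep ++ s' ++ (p ++ [a]).filterMap pvRepl? := by
      rw [pvStepA_eq]
      by_cases hk : pvKeep a
      · simp [hk, List.filter_append, List.filterMap_append, pvRepl?_eq_none_of_keep hk]
      · have hk' : pvKeep a = false := by simpa using hk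
        have hrm : PySem.List.remove? (p.filter pvKeep ++ a :: (s' ++ p.filterMap pvRepl?)) a
            = some (p.filter pvKeep ++ (s' ++ p.filterMap pvRepl?)) :=
          remove?_append_not_mem (not_mem_filter_keep hk' p)
        rw [if_neg (by simp [hk'])]
        cases hr : pvRepl? a with
        | some r =>
          rw [show p.filter pvKeep ++ a :: s' ++ p.filterMap pvRepl?
              = p.filter pvKeep ++ a :: (s' ++ p.filterMap pvRepl?) by simp, hrm]
          simp [List.filter_append, List.filterMap_append, hk', hr]
        | none =>
          rw [show p.filter pvKeep ++ a :: s' ++ p.filterMap pvRepl?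
              = p.filter pvKeep ++ a :: (s' ++ p.filterMap pvRepl?) by simp, hrm]
          simp [List.filter_append, List.filterMap_append, hk', hr]
    calc (a :: s').foldl pvStepA (p.filter pvKeep ++ a :: s' ++ p.filterMap pvRepl?)
        = s'.foldl pvStepA ((p ++ [a]).filter pvKeep ++ s' ++ (p ++ [a]).filterMap pvRepl?) := by
          rw [List.foldl_cons, step]
      _ = ((p ++ [a]) ++ s').filter pvKeep ++ ((p ++ [a]) ++ s').filterMap pvRepl? := ih (p ++ [a])
      _ = (p ++ a :: s').filter pvKeep ++ (p ++ a :: s').filterMap pvRepl? := by simp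

-- ===== VERDICT (by name: the statement is the Claim_ definition above) =====
theorem filtercolors_spec : Claim_equal_filtercolors := by
  intro color _
  show filtercolors color = filtercolors_alt color
  unfold filtercolors filtercolors_alt
  have hcopy : color.foldl (fun acc a => acc ++ [a]) [] = color := by
    simpa using PySem.List.foldl_append_singleton_eq_self color []
  have hinv := loopA_inv color []
  simp only [List.filter_nil, List.filterMap_nil, List.nil_append, List.append_nil] at hinv
  simp only [hcopy]
  exact hinv
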